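-- pv_equiv track=rewrite | github.com/adcroft/flint | flint/tools/makemake.py | __generate_link_list
-- ===== SOURCE A (Python) =====
-- def __generate_link_list(objects, needed_for_link_by, obj_list=[], level=0):
--     """Recursively follow through "needed_for_link_by" building a list of object files
--     encountered, starting with "objects"."""
--     if level<=99: # Avoid a complete run away in case of circular referencing
--         for o in objects:
--             if o not in obj_list:
--                 obj_list = obj_list + [ o ]
--                 if o in needed_for_link_by:
--                     for n in needed_for_link_by[o]:
--                         obj_list = __generate_link_list( [n], needed_for_link_by, obj_list, level+1 )
--     return obj_list
-- ===== SOURCE B (Python) =====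
-- def __generate_link_list(objects, needed_for_link_by, obj_list=[], level=0):
--     """Iterative DFS over an explicit stack of (object, level) pairs; a hash set
--     carries the membership test and the list is appended to in place."""
--     result = list(obj_list)
--     seen = set(result)
--     stack = [(o, level) for o in reversed(objects)]
--     while stack:
--         o, l = stack.pop()
--         if l <= 99 and o not in seen:
--             seen.add(o)
--             result.append(o)
--             for n in reversed(needed_for_link_by.get(o, [])):
--                 stack.append((n, l + 1))
--     return result
-- ===== Notes on version B (the rewrite author's own statement) =====
-- stated objective: alternative
-- what changed: Replaces the recursive DFS that rebuilds the list with 'obj_list + [o]' and scans it with 'o not in obj_list' by an iterative DFS over an explicit (node, level) stack with a hash-set membership test and in-place appends.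
import Mathlib
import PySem

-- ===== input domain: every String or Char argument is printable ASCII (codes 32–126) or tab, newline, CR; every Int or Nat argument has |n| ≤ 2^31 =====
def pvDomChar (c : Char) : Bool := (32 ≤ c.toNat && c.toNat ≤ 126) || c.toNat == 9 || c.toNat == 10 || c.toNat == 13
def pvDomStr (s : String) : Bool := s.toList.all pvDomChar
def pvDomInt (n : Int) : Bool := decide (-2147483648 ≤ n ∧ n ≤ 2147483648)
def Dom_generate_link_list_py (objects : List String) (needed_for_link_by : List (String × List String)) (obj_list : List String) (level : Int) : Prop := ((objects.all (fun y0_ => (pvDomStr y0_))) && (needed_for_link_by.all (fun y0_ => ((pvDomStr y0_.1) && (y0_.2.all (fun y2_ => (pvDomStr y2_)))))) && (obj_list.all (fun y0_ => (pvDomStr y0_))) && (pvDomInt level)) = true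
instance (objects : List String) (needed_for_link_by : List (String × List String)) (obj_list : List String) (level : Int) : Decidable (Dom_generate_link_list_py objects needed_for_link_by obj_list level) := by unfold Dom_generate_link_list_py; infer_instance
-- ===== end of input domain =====

-- B replaces A's recursive DFS (which rescans and rebuilds obj_list with 'o not in obj_list' / 'obj_list + [o]')
-- by an iterative DFS over an explicit (node, level) stack with a hash-set membership test;
-- return values proved equal (neither implementation mutates its arguments).

-- ===== PORT A =====
-- A's recursion depth is bounded by the 'level<=99' guard: the Lean transliteration carries the
-- remaining number of admissible levels, fuel = (100 - level).toNat, as its termination measure.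
-- Whenever 'level ≤ 99' holds, fuel ≥ 1, so the fuel-0 fallbacks below are never reached.
mutual
-- 'if level<=99: <for loop> ; return obj_list'
def genA_go (fuel : Nat) (objects : List String) (nfl : List (String × List String)) (obj_list : List String) (level : Int) : List String :=
  if level ≤ 99 then genA_objs fuel objects nfl obj_list level else obj_list
termination_by (fuel, 2, 0)
-- 'for o in objects: if o not in obj_list: obj_list = obj_list + [o]; if o in needed_for_link_by: <inner loop>'
def genA_objs (fuel : Nat) (objects : List String) (nfl : List (String × List String)) (obj_list : List String) (level : Int) : List String :=
  match objects with
  | [] => obj_list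
  | o :: rest =>
    let acc :=
      if o ∈ obj_list then obj_list
      else
        let a1 := obj_list ++ [o]
        match (PySem.Dict.mk nfl).get? o with
        | some ch => genA_ns fuel ch nfl a1 level
        | none => a1
    genA_objs fuel rest nfl acc level
termination_by (fuel, 1, objects.length)
-- 'for n in needed_for_link_by[o]: obj_list = __generate_link_list([n], needed_for_link_by, obj_list, level+1)'
def genA_ns (fuel : Nat) (ns : List String) (nfl : List (String × List String)) (obj_list : List String) (level : Int) : List String :=
  match ns with
  | [] => obj_list
  | n :: rest =>
    match fuel with
    | 0 => obj_list  -- unreachable: fuel = (100 - level).toNat ≥ 1 whenever level ≤ 99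
    | f + 1 => genA_ns (f + 1) rest nfl (genA_go f [n] nfl obj_list (level + 1)) level
termination_by (fuel, 0, ns.length)
end

def generate_link_list_py (objects : List String) (needed_for_link_by : List (String × List String)) (obj_list : List String) (level : Int) : List String :=
  genA_go (100 - level).toNat objects needed_for_link_by obj_list level

-- ===== PORT B =====
-- total number of linked-object names in the dict's values; bounds every pushed child batch
def valsLen (nfl : List (String × List String)) : Nat := (nfl.map (fun p => p.2.length)).sum

-- the 'while stack:' loop of Source B; the stack top is the list head (Source B pushes the reversed
-- children on the end and pops from the end — same discipline). 'fuel' counts remaining pops,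
-- the standard hand-port of a while loop; the caller passes a proven-sufficient bound.
def loopB (nfl : List (String × List String)) : Nat → List (String × Int) → List String → List String → List String
  | _, [], _, result => result
  | 0, _ :: _, _, result => result  -- fuel exhausted: unreachable for the bound chosen below
  | f + 1, (o, l) :: st, seen, result =>
    if l ≤ 99 ∧ o ∉ seen then
      loopB nfl f (((PySem.Dict.mk nfl).getD o []).map (fun n => (n, l + 1)) ++ st)
        (PySem.Set.add seen o) (result ++ [o])
    else
      loopB nfl f st seen result

def generate_link_list_py_alt (objects : List String) (needed_for_link_by : List (String × List String)) (obj_list : List String) (level : Int) : List String :=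
  let S := valsLen needed_for_link_by
  loopB needed_for_link_by (objects.length + (objects.length + S) * S + 1)
    (objects.map (fun o => (o, level))) (PySem.Set.ofList obj_list) obj_list

-- ===== PRECONDITION & SPEC =====
def Spec_generate_link_list_py (objects : List String) (needed_for_link_by : List (String × List String)) (obj_list : List String) (level : Int) (out : List String) : Prop := out = generate_link_list_py_alt objects needed_for_link_by obj_list level
instance (objects : List String) (needed_for_link_by : List (String × List String)) (obj_list : List String) (level : Int) (out : List String) : Decidable (Spec_generate_link_list_py objects needed_for_link_by obj_list level out) := by unfold Spec_generate_link_list_py; infer_instance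

-- ===== CLAIM (what is proved, stated in full; the proofs are below) =====
def Claim_equal_generate_link_list_py : Prop := ∀ (objects : List String) (needed_for_link_by : List (String × List String)) (obj_list : List String) (level : Int), Dom_generate_link_list_py objects needed_for_link_by obj_list level → Spec_generate_link_list_py objects needed_for_link_by obj_list level (generate_link_list_py objects needed_for_link_by obj_list level)

-- ===== LEMMAS AND PROOFS =====

-- step equations for B's loop
theorem loopB_nil (nfl : List (String × List String)) (f : Nat) (seen r : List String) :
    loopB nfl f [] seen r = r := by cases f <;> simp [loopB]

theorem loopB_skip (nfl : List (String × List String)) (f : Nat) (o : String) (l : Int)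
    (st : List (String × Int)) (seen r : List String) (h : ¬ (l ≤ 99 ∧ o ∉ seen)) :
    loopB nfl (f + 1) ((o, l) :: st) seen r = loopB nfl f st seen r := by
  simp only [loopB, if_neg h]

theorem loopB_expand (nfl : List (String × List String)) (f : Nat) (o : String) (l : Int)
    (st : List (String × Int)) (seen r : List String) (h : l ≤ 99 ∧ o ∉ seen) :
    loopB nfl (f + 1) ((o, l) :: st) seen r
      = loopB nfl f (((PySem.Dict.mk nfl).getD o []).map (fun n => (n, l + 1)) ++ st)
          (PySem.Set.add seen o) (r ++ [o]) := by
  simp only [loopB, if_pos h]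

-- every dict value has length ≤ valsLen, and its elements appear among the dict's values
theorem get?_length_le (nfl : List (String × List String)) (o : String) (ch : List String)
    (h : (PySem.Dict.mk nfl).get? o = some ch) :
    ch.length ≤ valsLen nfl ∧ ∀ x ∈ ch, x ∈ (nfl.map Prod.snd).flatten := by
  induction nfl with
  | nil => simp [PySem.Dict.get?] at h
  | cons p rest ihn =>
    obtain ⟨k, v⟩ := p
    rw [PySem.Dict.get?_mk_cons] at h
    by_cases hk : (k == o) = true
    · rw [if_pos hk] at h
      obtain rfl : v = ch := by simpa using h
      constructor
      · simp [valsLen]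
      · intro x hx; simp [List.flatten_cons]; exact Or.inl hx
    · rw [if_neg hk] at h
      obtain ⟨h1, h2⟩ := ihn h
      constructor
      · calc ch.length ≤ valsLen rest := h1
          _ ≤ valsLen ((k, v) :: rest) := by simp [valsLen]
      · intro x hx; simp [List.flatten_cons]; exact Or.inr (by simpa using h2 x hx)

-- the key simulation: running A's recursion on `objects` at `level` equals letting B's loop
-- consume the corresponding stack segment, in some exact number c of pops
theorem sim (nfl : List (String × List String)) (fA : Nat) :
    ∀ (level : Int) (objects : List String) (st : List (String × Int)) (seen r : List String),
    fA = (100 - level).toNat →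
    (∀ x, x ∈ seen ↔ x ∈ r) →
    ∃ (c : Nat) (t seen' : List String),
      genA_go fA objects nfl r level = r ++ t ∧
      t.Nodup ∧ (∀ x ∈ t, x ∉ r) ∧
      (∀ x ∈ t, x ∈ objects ∨ x ∈ (nfl.map Prod.snd).flatten) ∧
      c ≤ objects.length + t.length * valsLen nfl ∧
      (∀ x, x ∈ seen' ↔ x ∈ r ++ t) ∧
      (∀ g, loopB nfl (c + g) (objects.map (fun o => (o, level)) ++ st) seen r
           = loopB nfl g st seen' (r ++ t)) := by
  induction fA with
  | zero =>
    intro level objects st seen r hF hInv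
    have hlev : ¬ (level ≤ 99) := by omega
    refine ⟨objects.length, [], seen, by simp [genA_go, hlev], by simp, by simp, by simp,
      by simp, by simpa using hInv, ?_⟩
    intro g
    induction objects generalizing g with
    | nil => simp
    | cons o os iho =>
      have hl : (o :: os).length + g = (os.length + g) + 1 := by simp; omega
      rw [hl, List.map_cons, List.cons_append,
        loopB_skip nfl (os.length + g) o level _ seen r (by tauto)]
      exact iho g
  | succ f ih =>
    intro level objects st seen r hF hInv
    have hlev : level ≤ 99 := by omega
    have hf : f = (100 - (level + 1)).toNat := by omega
    -- processing one batch of children (the inner 'for n in needed_for_link_by[o]' loop)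
    have CH : ∀ (ch : List String), (∀ x ∈ ch, x ∈ (nfl.map Prod.snd).flatten) →
        ∀ (st : List (String × Int)) (seen r : List String), (∀ x, x ∈ seen ↔ x ∈ r) →
        ∃ (c : Nat) (t seen' : List String),
          genA_ns (f + 1) ch nfl r level = r ++ t ∧
          t.Nodup ∧ (∀ x ∈ t, x ∉ r) ∧
          (∀ x ∈ t, x ∈ (nfl.map Prod.snd).flatten) ∧
          c ≤ ch.length + t.length * valsLen nfl ∧
          (∀ x, x ∈ seen' ↔ x ∈ r ++ t) ∧
          (∀ g, loopB nfl (c + g) (ch.map (fun n => (n, level + 1)) ++ st) seen r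
               = loopB nfl g st seen' (r ++ t)) := by
      intro ch
      induction ch with
      | nil =>
        intro _ st seen r hInv
        exact ⟨0, [], seen, by simp [genA_ns], by simp, by simp, by simp, by simp,
          by simpa using hInv, fun g => by simp⟩
      | cons n cht ihc =>
        intro hsub st seen r hInv
        obtain ⟨c₁, t₁, seen₁, hA₁, hnd₁, hdj₁, hsrc₁, hc₁, hinv₁, hloop₁⟩ :=
          ih (level + 1) [n] (cht.map (fun n => (n, level + 1)) ++ st) seen r hf hInv
        obtain ⟨c₂, t₂, seen₂, hA₂, hnd₂, hdj₂, hsrc₂, hc₂, hinv₂, hloop₂⟩ :=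
          ihc (fun x hx => hsub x (List.mem_cons_of_mem n hx)) st seen₁ (r ++ t₁) hinv₁
        refine ⟨c₁ + c₂, t₁ ++ t₂, seen₂, ?_, ?_, ?_, ?_, ?_, ?_, ?_⟩
        · simp only [genA_ns]
          rw [hA₁, hA₂, List.append_assoc]
        · rw [List.nodup_append]
          refine ⟨hnd₁, hnd₂, ?_⟩
          intro a ha b hb he
          exact hdj₂ b hb (List.mem_append_right r (he ▸ ha))
        · intro x hx
          rcases List.mem_append.1 hx with hx1 | hx2
          · exact hdj₁ x hx1
          · exact fun hr => hdj₂ x hx2 (List.mem_append_left t₁ hr)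
        · intro x hx
          rcases List.mem_append.1 hx with hx1 | hx2
          · rcases hsrc₁ x hx1 with h1 | h2
            · obtain rfl : x = n := by simpa using h1
              exact hsub x (List.mem_cons_self)
            · exact h2
          · exact hsrc₂ x hx2
        · have h1 : c₁ ≤ 1 + t₁.length * valsLen nfl := by simpa using hc₁
          rw [List.length_append, List.length_cons, Nat.add_mul]
          linarith
        · intro x
          rw [hinv₂ x, List.append_assoc]
        · intro g
          rw [List.map_cons, List.cons_append, Nat.add_assoc]
          have e₁ := hloop₁ (c₂ + g)
          simp only [List.map_cons, List.map_nil, List.cons_append, List.nil_append] at e₁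
          rw [e₁, hloop₂ g, List.append_assoc]
    -- the outer 'for o in objects' loop
    have OBJ : ∀ (objects : List String) (st : List (String × Int)) (seen r : List String),
        (∀ x, x ∈ seen ↔ x ∈ r) →
        ∃ (c : Nat) (t seen' : List String),
          genA_objs (f + 1) objects nfl r level = r ++ t ∧
          t.Nodup ∧ (∀ x ∈ t, x ∉ r) ∧
          (∀ x ∈ t, x ∈ objects ∨ x ∈ (nfl.map Prod.snd).flatten) ∧
          c ≤ objects.length + t.length * valsLen nfl ∧
          (∀ x, x ∈ seen' ↔ x ∈ r ++ t) ∧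
          (∀ g, loopB nfl (c + g) (objects.map (fun o => (o, level)) ++ st) seen r
               = loopB nfl g st seen' (r ++ t)) := by
      intro objects
      induction objects with
      | nil =>
        intro st seen r hInv
        exact ⟨0, [], seen, by simp [genA_objs], by simp, by simp, by simp, by simp,
          by simpa using hInv, fun g => by simp⟩
      | cons o rest iho =>
        intro st seen r hInv
        by_cases ho : o ∈ r
        · obtain ⟨c₂, t₂, seen₂, hA₂, hnd₂, hdj₂, hsrc₂, hc₂, hinv₂, hloop₂⟩ :=
            iho st seen r hInv
          refine ⟨c₂ + 1, t₂, seen₂, ?_, hnd₂, hdj₂, ?_, ?_, hinv₂, ?_⟩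
          · simp only [genA_objs]
            rw [if_pos ho]
            exact hA₂
          · intro x hx
            rcases hsrc₂ x hx with h1 | h2
            · exact Or.inl (List.mem_cons_of_mem o h1)
            · exact Or.inr h2
          · rw [List.length_cons]; omega
          · intro g
            have hstep : c₂ + 1 + g = (c₂ + g) + 1 := by omega
            rw [List.map_cons, List.cons_append, hstep,
              loopB_skip nfl (c₂ + g) o level _ seen r
                (by rw [not_and_or]; exact Or.inr (by simp [(hInv o).2 ho])),
              hloop₂ g]
        · have hns : o ∉ seen := fun hs => ho ((hInv o).1 hs)
          have hInv' : ∀ x, x ∈ PySem.Set.add seen o ↔ x ∈ r ++ [o] := by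
            intro x
            rw [PySem.Set.mem_add, hInv x]
            simp
          cases hgo : (PySem.Dict.mk nfl).get? o with
          | none =>
            obtain ⟨c₂, t₂, seen₂, hA₂, hnd₂, hdj₂, hsrc₂, hc₂, hinv₂, hloop₂⟩ :=
              iho st (PySem.Set.add seen o) (r ++ [o]) hInv'
            refine ⟨c₂ + 1, o :: t₂, seen₂, ?_, ?_, ?_, ?_, ?_, ?_, ?_⟩
            · simp only [genA_objs]
              rw [if_neg ho, hgo]
              simp only [hA₂]
              rw [List.append_assoc, List.singleton_append]
            · rw [List.nodup_cons]
              exact ⟨fun hx => hdj₂ o hx (List.mem_append_right r (by simp)), hnd₂⟩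
            · intro x hx
              rcases List.mem_cons.1 hx with rfl | hx2
              · exact ho
              · exact fun hr => hdj₂ x hx2 (List.mem_append_left [o] hr)
            · intro x hx
              rcases List.mem_cons.1 hx with rfl | hx2
              · exact Or.inl List.mem_cons_self
              · rcases hsrc₂ x hx2 with h1 | h2
                · exact Or.inl (List.mem_cons_of_mem o h1)
                · exact Or.inr h2
            · rw [List.length_cons, List.length_cons, Nat.add_mul, Nat.one_mul]
              linarith
            · intro x
              rw [hinv₂ x, List.append_assoc, List.singleton_append]
            · intro g
              have hstep : c₂ + 1 + g = (c₂ + g) + 1 := by omega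
              rw [List.map_cons, List.cons_append, hstep,
                loopB_expand nfl (c₂ + g) o level _ seen r ⟨hlev, hns⟩,
                PySem.Dict.getD_eq_get?_getD, hgo]
              simp only [Option.getD_none, List.map_nil, List.nil_append]
              rw [hloop₂ g, List.append_assoc, List.singleton_append]
          | some chv =>
            obtain ⟨hchlen, hchsub⟩ := get?_length_le nfl o chv hgo
            obtain ⟨c₁, t₁, seen₁, hA₁, hnd₁, hdj₁, hsrc₁, hc₁, hinv₁, hloop₁⟩ :=
              CH chv hchsub (rest.map (fun o => (o, level)) ++ st)
                (PySem.Set.add seen o) (r ++ [o]) hInv'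
            obtain ⟨c₂, t₂, seen₂, hA₂, hnd₂, hdj₂, hsrc₂, hc₂, hinv₂, hloop₂⟩ :=
              iho st seen₁ ((r ++ [o]) ++ t₁) hinv₁
            refine ⟨1 + c₁ + c₂, (o :: t₁) ++ t₂, seen₂, ?_, ?_, ?_, ?_, ?_, ?_, ?_⟩
            · simp only [genA_objs]
              rw [if_neg ho, hgo]
              simp only [hA₁, hA₂]
              simp [List.append_assoc]
            · rw [List.nodup_append, List.nodup_cons]
              refine ⟨⟨fun hx => hdj₁ o hx (by simp), hnd₁⟩, hnd₂, ?_⟩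
              intro a ha b hb he
              subst he
              rcases List.mem_cons.1 ha with rfl | ha'
              · exact hdj₂ a hb (by simp)
              · exact hdj₂ a hb (List.mem_append_right (r ++ [o]) ha')
            · intro x hx
              rcases List.mem_append.1 hx with hx1 | hx2
              · rcases List.mem_cons.1 hx1 with rfl | hx1'
                · exact ho
                · exact fun hr => hdj₁ x hx1' (List.mem_append_left [o] hr)
              · exact fun hr => hdj₂ x hx2 (by simp [hr])
            · intro x hx
              rcases List.mem_append.1 hx with hx1 | hx2
              · rcases List.mem_cons.1 hx1 with rfl | hx1'
                · exact Or.inl List.mem_cons_self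
                · exact Or.inr (hsrc₁ x hx1')
              · rcases hsrc₂ x hx2 with h1 | h2
                · exact Or.inl (List.mem_cons_of_mem o h1)
                · exact Or.inr h2
            · have h1 : c₁ ≤ valsLen nfl + t₁.length * valsLen nfl := by
                have := Nat.add_le_add_right (Nat.mul_le_mul_right (valsLen nfl) (le_refl t₁.length)) 0
                linarith [hc₁, hchlen]
              rw [List.length_append, List.length_cons, List.length_cons, Nat.add_mul, Nat.add_mul]
              linarith
            · intro x
              rw [hinv₂ x]
              simp [List.append_assoc]
            · intro g
              have hstep : 1 + c₁ + c₂ + g = (c₁ + (c₂ + g)) + 1 := by omega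
              rw [List.map_cons, List.cons_append, hstep,
                loopB_expand nfl (c₁ + (c₂ + g)) o level _ seen r ⟨hlev, hns⟩,
                PySem.Dict.getD_eq_get?_getD, hgo]
              simp only [Option.getD_some]
              rw [hloop₁ (c₂ + g), hloop₂ g]
              simp [List.append_assoc]
    obtain ⟨c, t, seen', h1, h2, h3, h4, h5, h6, h7⟩ := OBJ objects st seen r hInv
    exact ⟨c, t, seen', by rw [show genA_go (f + 1) objects nfl r level
        = genA_objs (f + 1) objects nfl r level from by simp [genA_go, hlev]]; exact h1,
      h2, h3, h4, h5, h6, h7⟩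

-- ===== VERDICT (by name: the statement is the Claim_ definition above) =====
theorem generate_link_list_py_spec : Claim_equal_generate_link_list_py := by
  intro objects nfl obj_list level _hdom
  unfold Spec_generate_link_list_py
  obtain ⟨c, t, seen', hA, hnd, hdj, hsrc, hc, hinv, hloop⟩ :=
    sim nfl (100 - level).toNat level objects [] (PySem.Set.ofList obj_list) obj_list rfl
      (fun x => PySem.Set.mem_ofList obj_list x)
  have htlen : t.length ≤ objects.length + valsLen nfl := by
    have hsub : t ⊆ objects ++ (nfl.map Prod.snd).flatten := by
      intro x hx
      rcases hsrc x hx with h1 | h2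
      · exact List.mem_append_left _ h1
      · exact List.mem_append_right _ h2
    have hlen := (hnd.subperm hsub).length_le
    rw [List.length_append, List.length_flatten, List.map_map] at hlen
    simpa [valsLen, Function.comp] using hlen
  have hcN : c ≤ objects.length + (objects.length + valsLen nfl) * valsLen nfl := by
    have := Nat.mul_le_mul_right (valsLen nfl) htlen
    linarith
  unfold generate_link_list_py generate_link_list_py_alt
  rw [hA]
  have hfuel : objects.length + (objects.length + valsLen nfl) * valsLen nfl + 1
      = c + (objects.length + (objects.length + valsLen nfl) * valsLen nfl + 1 - c) := by omega
  simp only []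
  rw [hfuel]
  have := hloop (objects.length + (objects.length + valsLen nfl) * valsLen nfl + 1 - c)
  rw [List.append_nil] at this
  rw [this, loopB_nil]
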